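-- pv_equiv track=rewrite | github.com/MrBrantCode/unitest_baseline | mut_generate/mist_train_cf/cf_7704/solution.py | find_longest_even_words
-- ===== SOURCE A (Python) =====
-- from typing import List
--
-- def find_longest_even_words(words: List[str]) -> List[str]:
--     max_length = 0
--     result = []
--
--     for word in words:
--         if len(word) % 2 == 0:
--             if len(word) > max_length:
--                 max_length = len(word)
--                 result = [word]
--             elif len(word) == max_length:
--                 result.append(word)
--
--     return result
-- ===== SOURCE B (Python) =====
-- def find_longest_even_words(words):
--     max_len = 0
--     for w in words:
--         if len(w) % 2 == 0 and len(w) > max_len: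
--             max_len = len(w)
--     return [w for w in words if len(w) % 2 == 0 and len(w) == max_len]
-- ===== Notes on version B (the rewrite author's own statement) =====
-- stated objective: simpler
-- what changed: B first computes the maximum even word length in one pass, then filters the list for words of that length, instead of A's single pass that maintains and resets a result list on the fly.
import Mathlib
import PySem

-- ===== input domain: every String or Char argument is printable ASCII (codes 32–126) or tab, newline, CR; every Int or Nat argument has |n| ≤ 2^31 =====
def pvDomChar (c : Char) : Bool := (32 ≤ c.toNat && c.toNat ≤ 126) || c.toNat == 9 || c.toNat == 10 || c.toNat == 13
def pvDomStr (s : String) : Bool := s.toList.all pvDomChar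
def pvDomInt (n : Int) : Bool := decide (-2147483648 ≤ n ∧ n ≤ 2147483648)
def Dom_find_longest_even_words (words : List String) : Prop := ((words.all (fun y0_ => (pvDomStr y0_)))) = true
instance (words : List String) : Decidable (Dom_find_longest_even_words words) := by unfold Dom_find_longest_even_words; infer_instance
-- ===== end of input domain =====

-- B computes the maximum even length in a first pass, then filters for it (simpler decomposition than A's reset/extend single pass).


-- ===== PORT A =====
-- A's single loop: state (max_length, result), result reset on a new maximum, extended on a tie.
def pvLoopA : List String → Int → List String → Int × List String
  | [], m, r => (m, r)
  | w :: ws, m, r =>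
    if PySem.Str.len w % 2 = 0 then
      if PySem.Str.len w > m then pvLoopA ws (PySem.Str.len w) [w]
      else if PySem.Str.len w = m then pvLoopA ws m (r ++ [w])
      else pvLoopA ws m r
    else pvLoopA ws m r

def find_longest_even_words (words : List String) : List String :=
  (pvLoopA words 0 []).2

-- ===== PORT B =====
-- B's first pass: compute the maximum even length.
def pvMaxB : List String → Int → Int
  | [], m => m
  | w :: ws, m =>
    if PySem.Str.len w % 2 = 0 ∧ PySem.Str.len w > m then pvMaxB ws (PySem.Str.len w)
    else pvMaxB ws m

def find_longest_even_words_alt (words : List String) : List String :=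
  let maxLen := pvMaxB words 0
  words.filter (fun w => decide (PySem.Str.len w % 2 = 0 ∧ PySem.Str.len w = maxLen))

-- ===== PRECONDITION & SPEC =====
def Spec_find_longest_even_words (words : List String) (out : List String) : Prop := out = find_longest_even_words_alt words
instance (words : List String) (out : List String) : Decidable (Spec_find_longest_even_words words out) := by unfold Spec_find_longest_even_words; infer_instance

-- ===== CLAIM (what is proved, stated in full; the proofs are below) =====
def Claim_equal_find_longest_even_words : Prop := ∀ (words : List String), Dom_find_longest_even_words words → Spec_find_longest_even_words words (find_longest_even_words words)

-- ===== LEMMAS AND PROOFS =====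

lemma pvMaxB_ge : ∀ (ws : List String) (m : Int), m ≤ pvMaxB ws m := by
  intro ws
  induction ws with
  | nil => intro m; simp [pvMaxB]
  | cons w ws ih =>
    intro m
    simp only [pvMaxB]
    split
    · exact le_trans (by omega : m ≤ PySem.Str.len w) (ih _)
    · exact ih m

lemma pvLoopA_spec : ∀ (ws : List String) (m : Int) (r : List String),
    pvLoopA ws m r =
      (pvMaxB ws m,
       (if pvMaxB ws m = m then r else []) ++
         ws.filter (fun w => decide (PySem.Str.len w % 2 = 0 ∧ PySem.Str.len w = pvMaxB ws m))) := by
  intro ws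
  induction ws with
  | nil => intro m r; simp [pvLoopA, pvMaxB]
  | cons w ws ih =>
    intro m r
    simp only [pvLoopA, List.filter_cons, decide_eq_true_eq]
    by_cases he : PySem.Str.len w % 2 = 0
    · by_cases hgt : PySem.Str.len w > m
      · have hM : pvMaxB (w :: ws) m = pvMaxB ws (PySem.Str.len w) := by
          simp only [pvMaxB]; rw [if_pos ⟨he, hgt⟩]
        simp only [hM]
        rw [if_pos he, if_pos hgt, ih]
        have hMge : PySem.Str.len w ≤ pvMaxB ws (PySem.Str.len w) := pvMaxB_ge ws _
        rw [if_neg (by omega : ¬ pvMaxB ws (PySem.Str.len w) = m)]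
        by_cases hw : PySem.Str.len w = pvMaxB ws (PySem.Str.len w)
        · rw [if_pos hw.symm, if_pos ⟨he, hw⟩]; simp
        · rw [if_neg (fun h => hw h.symm), if_neg (fun h => hw h.2)]
      · have hM : pvMaxB (w :: ws) m = pvMaxB ws m := by
          simp only [pvMaxB]; rw [if_neg (fun h => hgt h.2)]
        simp only [hM]
        by_cases heq : PySem.Str.len w = m
        · rw [if_pos he, if_neg hgt, if_pos heq, ih]
          by_cases hMm : pvMaxB ws m = m
          · rw [if_pos hMm, if_pos hMm, if_pos ⟨he, heq.trans hMm.symm⟩]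
            simp
          · rw [if_neg hMm, if_neg hMm, if_neg (fun h => hMm (by omega))]
        · rw [if_pos he, if_neg hgt, if_neg heq, ih]
          have hMge : m ≤ pvMaxB ws m := pvMaxB_ge ws m
          rw [if_neg (fun h : _ ∧ _ => heq (by omega))]
    · have hM : pvMaxB (w :: ws) m = pvMaxB ws m := by
        simp only [pvMaxB]; rw [if_neg (fun h => he h.1)]
      simp only [hM]
      rw [if_neg he, if_neg (fun h : _ ∧ _ => he h.1), ih]

-- ===== VERDICT (by name: the statement is the Claim_ definition above) =====
theorem find_longest_even_words_spec : Claim_equal_find_longest_even_words := by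
  intro words _
  unfold Spec_find_longest_even_words find_longest_even_words find_longest_even_words_alt
  rw [pvLoopA_spec]
  split <;> simp
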